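-- pv_equiv track=rewrite | github.com/albararamli/ic | example.py | get_ic_indices
-- ===== SOURCE A (Python) =====
-- def get_ic_indices(border_indices, original_peaks, z_axis_data):
--     ic_indices = []
--     for i in range(1, len(border_indices)):
--         current_border, previous_border = border_indices[i], border_indices[i-1]
--         max_peak_val, max_peak_index = float('-inf'), float('-inf')
--         for peak in original_peaks:
--             if previous_border < peak <= current_border:
--                 if max_peak_val < z_axis_data[peak]:
--                     max_peak_val, max_peak_index = z_axis_data[peak], peak
--         if max_peak_index != float('-inf'):
--             ic_indices.append(max_peak_index)
--     return ic_indices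
-- ===== SOURCE B (Python) =====
-- def get_ic_indices(border_indices, original_peaks, z_axis_data):
--     # Sort-then-first-match: rank the relevant peaks once by descending z
--     # (stable: ties keep original peak order), then the answer for each
--     # interval is simply the first ranked peak that falls inside it.
--     intervals = list(zip(border_indices, border_indices[1:]))
--     relevant = [pk for pk in original_peaks
--                 if any(lo < pk <= hi for lo, hi in intervals)]
--     ranked = sorted(relevant, key=lambda pk: -z_axis_data[pk])
--     out = []
--     for lo, hi in intervals:
--         hit = next((pk for pk in ranked if lo < pk <= hi), None)
--         if hit is not None:
--             out.append(hit)
--     return out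
-- ===== Notes on version B (the rewrite author's own statement) =====
-- stated objective: alternative
-- what changed: B replaces A's per-interval max-tracking scan with a sort-then-first-match scheme: the relevant peaks are stably sorted once by descending z, and each interval's answer is the first ranked peak falling inside it.
import Mathlib
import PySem

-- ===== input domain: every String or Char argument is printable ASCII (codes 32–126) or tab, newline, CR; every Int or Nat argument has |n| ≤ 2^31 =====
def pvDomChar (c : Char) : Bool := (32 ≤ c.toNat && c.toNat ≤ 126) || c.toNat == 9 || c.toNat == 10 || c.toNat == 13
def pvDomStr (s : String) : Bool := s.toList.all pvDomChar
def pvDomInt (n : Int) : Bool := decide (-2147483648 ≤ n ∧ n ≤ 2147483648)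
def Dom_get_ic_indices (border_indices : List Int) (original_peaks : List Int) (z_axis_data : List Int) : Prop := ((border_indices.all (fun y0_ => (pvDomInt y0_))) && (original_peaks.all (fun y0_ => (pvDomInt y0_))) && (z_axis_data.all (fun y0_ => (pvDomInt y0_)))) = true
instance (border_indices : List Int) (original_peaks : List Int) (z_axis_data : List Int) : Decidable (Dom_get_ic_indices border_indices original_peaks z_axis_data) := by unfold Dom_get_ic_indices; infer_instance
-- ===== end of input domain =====

-- B ranks the relevant peaks once by descending z (stable sort) and takes, per interval, the
-- first ranked peak inside it, instead of A's per-interval max-tracking scan (objective: alternative).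

-- ===== PORT A =====
-- A's (max_peak_val, max_peak_index) pair, initially (float('-inf'), float('-inf')), is modeled as
-- Option (Int × Int) with none = "still -inf": -inf is < every int and the two fields are only ever
-- set together, so this is exact. z_axis_data[peak] is pyGetD with default 0; the default is only
-- reached where Python raises IndexError, which Pre_ excludes.
-- the body of A's inner 'for peak in original_peaks' loop
def aStep (z_axis_data : List Int) (previous_border current_border : Int)
    (st : Option (Int × Int)) (peak : Int) : Option (Int × Int) :=
  if previous_border < peak ∧ peak ≤ current_border then
    let zv := PySem.List.pyGetD z_axis_data peak 0
    match st with
    | none => some (zv, peak)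
    | some (max_peak_val, max_peak_index) =>
        if max_peak_val < zv then some (zv, peak) else some (max_peak_val, max_peak_index)
  else st

def get_ic_indices (border_indices : List Int) (original_peaks : List Int) (z_axis_data : List Int) : List Int :=
  (PySem.List.pyRange 1 border_indices.length 1).foldl
    (fun ic_indices i =>
      let current_border := PySem.List.pyGetD border_indices i 0
      let previous_border := PySem.List.pyGetD border_indices (i - 1) 0
      let st := original_peaks.foldl (aStep z_axis_data previous_border current_border) none
      match st with
      | some (_, max_peak_index) => ic_indices ++ [max_peak_index]
      | none => ic_indices)
    []

-- ===== PORT B =====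
-- zip(b, b[1:]) is List.zip with drop 1; the list comprehension with 'any' is filter/any; sorted
-- with key -z is PySem.List.sorted (stable); next((… if cond), None) is List.find?.
def get_ic_indices_alt (border_indices : List Int) (original_peaks : List Int) (z_axis_data : List Int) : List Int :=
  let intervals := border_indices.zip (border_indices.drop 1)
  let relevant := original_peaks.filter
    (fun pk => intervals.any (fun pr => decide (pr.1 < pk ∧ pk ≤ pr.2)))
  let ranked := PySem.List.sorted relevant (fun pk => -(PySem.List.pyGetD z_axis_data pk 0)) false
  intervals.foldl
    (fun out pr =>
      match ranked.find? (fun pk => decide (pr.1 < pk ∧ pk ≤ pr.2)) with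
      | some pk => out ++ [pk]
      | none => out)
    []

-- ===== PRECONDITION & SPEC =====
-- Pre_ excludes exactly the inputs where Python A raises IndexError: a peak that lies in some
-- consecutive border interval but is not a valid (possibly negative) index into z_axis_data.
def Pre_get_ic_indices (border_indices : List Int) (original_peaks : List Int) (z_axis_data : List Int) : Prop :=
  ∀ peak ∈ original_peaks,
    (∃ pr ∈ border_indices.zip (border_indices.drop 1), pr.1 < peak ∧ peak ≤ pr.2) →
    PySem.Raise.InRange z_axis_data.length peak
instance (border_indices : List Int) (original_peaks : List Int) (z_axis_data : List Int) : Decidable (Pre_get_ic_indices border_indices original_peaks z_axis_data) := by unfold Pre_get_ic_indices; infer_instance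

def pvWitness_get_ic_indices : List Int × List Int × List Int :=
  ([0, 5, 10], [2, 3, 7], [0, 1, 2, 3, 9, 5, 6, 7, 8, 9, 10])

def Spec_get_ic_indices (border_indices : List Int) (original_peaks : List Int) (z_axis_data : List Int) (out : List Int) : Prop := out = get_ic_indices_alt border_indices original_peaks z_axis_data
instance (border_indices : List Int) (original_peaks : List Int) (z_axis_data : List Int) (out : List Int) : Decidable (Spec_get_ic_indices border_indices original_peaks z_axis_data out) := by unfold Spec_get_ic_indices; infer_instance

-- ===== CLAIM (what is proved, stated in full; the proofs are below) =====
def Claim_equal_get_ic_indices : Prop := ∀ (border_indices : List Int) (original_peaks : List Int) (z_axis_data : List Int), Dom_get_ic_indices border_indices original_peaks z_axis_data → Pre_get_ic_indices border_indices original_peaks z_axis_data → Spec_get_ic_indices border_indices original_peaks z_axis_data (get_ic_indices border_indices original_peaks z_axis_data)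

-- ===== LEMMAS AND PROOFS =====

-- B's selection re-expressed as a left-to-right "first strict minimum of key among q" fold; the
-- proof shows it equals both A's max-tracking fold (key = -z) and B's find? on the sorted list.
def pstep (key : Int → Int) (q : Int → Bool) (st : Option Int) (x : Int) : Option Int :=
  if q x then
    match st with
    | none => some x
    | some b => if key x < key b then some x else some b
  else st

def pick (key : Int → Int) (q : Int → Bool) (xs : List Int) : Option Int :=
  xs.foldl (pstep key q) none

-- inserting x stably into a key-nondecreasing list updates find? exactly like one pstep step
theorem find?_insertBy (key : Int → Int) (q : Int → Bool) (x : Int) :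
    ∀ (r : List Int), r.Pairwise (fun a b => key a ≤ key b) →
      (PySem.List.insertBy (fun a b => decide (key a < key b)) x r).find? q
        = pstep key q (r.find? q) x := by
  intro r
  induction r with
  | nil =>
      intro _
      simp [PySem.List.insertBy, pstep, List.find?]
  | cons y t ih =>
      intro hp
      have hyt : ∀ b ∈ t, key y ≤ key b := (List.pairwise_cons.mp hp).1
      have hpt : t.Pairwise (fun a b => key a ≤ key b) := (List.pairwise_cons.mp hp).2
      by_cases hxy : key x < key y
      · simp only [PySem.List.insertBy, hxy, decide_true, if_true]
        cases hqx : q x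
        · simp [List.find?_cons, hqx, pstep]
        · -- q x: LHS = some x; RHS: if old find is some b then key x < key b
          simp only [List.find?_cons, hqx, pstep]
          cases hqy : q y
          · cases hf : List.find? q t with
            | none => simp
            | some b =>
                have hb : b ∈ t := List.mem_of_find?_eq_some hf
                have : key x < key b := lt_of_lt_of_le hxy (hyt b hb)
                simp [this]
          · have : key x < key y := hxy
            simp [this]
      · simp only [PySem.List.insertBy, hxy, decide_false, Bool.false_eq_true, if_false]
        cases hqy : q y
        · simp only [List.find?_cons, hqy]
          exact ih hpt
        · simp only [List.find?_cons, hqy, pstep]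
          cases hqx : q x
          · simp
          · simp [hxy]

-- find? on the stable key-sort of xs computes pick over xs in original order
theorem find?_sorted (key : Int → Int) (q : Int → Bool) (xs : List Int) :
    (PySem.List.sorted xs key false).find? q = pick key q xs := by
  induction xs using List.reverseRecOn with
  | nil => simp [PySem.List.sorted_eq_foldl_insertBy, pick]
  | append_singleton t x ih =>
      have hs : PySem.List.sorted (t ++ [x]) key false
          = PySem.List.insertBy (fun a b => decide (key a < key b)) x
              (PySem.List.sorted t key false) := by
        simp [PySem.List.sorted_eq_foldl_insertBy, List.foldl_append]
      rw [hs, find?_insertBy key q x _ (PySem.List.sorted_pairwise t key), ih]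
      simp [pick, List.foldl_append]

-- dropping elements that can never satisfy q does not change pick
theorem pick_filter (key : Int → Int) (q r : Int → Bool)
    (h : ∀ x, q x = true → r x = true) (xs : List Int) :
    pick key q (xs.filter r) = pick key q xs := by
  simp only [pick, List.foldl_filter]
  congr 1
  funext st x
  by_cases hr : r x = true
  · simp [hr]
  · have hq : q x = false := by
      cases hqx : q x
      · rfl
      · exact absurd (h x hqx) hr
    simp [hr, pstep, hq]

-- A's inner fold is pick with key = -z, the state decorated with its z-value
theorem afold_pick (z : List Int) (lo hi : Int) (xs : List Int) :
    ∀ (o : Option Int),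
      xs.foldl (aStep z lo hi) (o.map (fun pk => (PySem.List.pyGetD z pk 0, pk)))
        = (xs.foldl (pstep (fun pk => -(PySem.List.pyGetD z pk 0))
              (fun pk => decide (lo < pk ∧ pk ≤ hi))) o).map
            (fun pk => (PySem.List.pyGetD z pk 0, pk)) := by
  induction xs with
  | nil => intro o; simp
  | cons x t ih =>
      intro o
      simp only [List.foldl_cons]
      have hstep : aStep z lo hi (o.map (fun pk => (PySem.List.pyGetD z pk 0, pk))) x
          = (pstep (fun pk => -(PySem.List.pyGetD z pk 0))
              (fun pk => decide (lo < pk ∧ pk ≤ hi)) o x).map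
              (fun pk => (PySem.List.pyGetD z pk 0, pk)) := by
        cases o with
        | none =>
            by_cases hc : lo < x ∧ x ≤ hi <;> simp [aStep, pstep, hc]
        | some b =>
            by_cases hc : lo < x ∧ x ≤ hi
            · have : (-(PySem.List.pyGetD z x 0) < -(PySem.List.pyGetD z b 0))
                  ↔ (PySem.List.pyGetD z b 0 < PySem.List.pyGetD z x 0) := by omega
              by_cases hv : PySem.List.pyGetD z b 0 < PySem.List.pyGetD z x 0 <;>
                simp [aStep, pstep, hc, hv, this]
            · simp [aStep, pstep, hc]
      rw [hstep, ih]

-- the pairs (border[i-1], border[i]) for i in range(1, len) ARE zip borders (drop 1 borders)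
theorem range_pairs (b : List Int) :
    (PySem.List.pyRange 1 b.length 1).map
        (fun i => (PySem.List.pyGetD b (i - 1) 0, PySem.List.pyGetD b i 0))
      = b.zip (b.drop 1) := by
  apply List.ext_getElem
  · simp [PySem.List.length_pyRange_one]
  · intro j h1 h2
    have hlen : j + 1 < b.length := by
      simp [PySem.List.length_pyRange_one] at h1; omega
    simp only [List.getElem_map, PySem.List.getElem_pyRange_one, List.getElem_zip,
      List.getElem_drop, Prod.mk.injEq]
    constructor
    · rw [show (1 : Int) + (j : Int) - 1 = ((j : Nat) : Int) by ring,
        PySem.List.pyGetD_natCast]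
      exact List.getD_eq_getElem _ _ (by omega)
    · rw [show (1 : Int) + (j : Int) = (((j + 1 : Nat)) : Int) by push_cast; ring,
        PySem.List.pyGetD_natCast]
      rw [List.getD_eq_getElem _ _ (by omega)]
      congr 1
      omega

-- ===== VERDICT (by name: the statement is the Claim_ definition above) =====
theorem get_ic_indices_spec : Claim_equal_get_ic_indices := by
  intro b p z _ _
  show get_ic_indices b p z = get_ic_indices_alt b p z
  have hA : get_ic_indices b p z
      = (b.zip (b.drop 1)).foldl
          (fun ic pr =>
            match p.foldl (aStep z pr.1 pr.2) none with
            | some (_, idx) => ic ++ [idx]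
            | none => ic) [] := by
    rw [get_ic_indices, ← range_pairs b, List.foldl_map]
  rw [hA]
  simp only [get_ic_indices_alt]
  apply PySem.List.foldl_congr_mem
  intro acc pr hpr
  have h1 := afold_pick z pr.1 pr.2 p (none : Option Int)
  simp only [Option.map_none] at h1
  have h2 := find?_sorted (fun pk => -(PySem.List.pyGetD z pk 0))
      (fun pk => decide (pr.1 < pk ∧ pk ≤ pr.2))
      (p.filter (fun pk => (b.zip (b.drop 1)).any (fun pr2 => decide (pr2.1 < pk ∧ pk ≤ pr2.2))))
  have h3 := pick_filter (fun pk => -(PySem.List.pyGetD z pk 0))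
      (fun pk => decide (pr.1 < pk ∧ pk ≤ pr.2))
      (fun pk => (b.zip (b.drop 1)).any (fun pr2 => decide (pr2.1 < pk ∧ pk ≤ pr2.2)))
      (by
        intro x hx
        simp only [decide_eq_true_eq] at hx
        exact List.any_eq_true.mpr ⟨pr, hpr, by simp [hx.1, hx.2]⟩)
      p
  rw [h1, h2, h3]
  cases hp : pick (fun pk => -(PySem.List.pyGetD z pk 0))
      (fun pk => decide (pr.1 < pk ∧ pk ≤ pr.2)) p with
  | none => unfold pick at hp; rw [hp]; rfl
  | some v => unfold pick at hp; rw [hp]; rfl
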